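-- pv_equiv track=rewrite | github.com/sjsfwch/tsPatternClassifier | src/classifier_old.py | checkMultiSpikeUp
-- ===== SOURCE A (Python) =====
-- SIGMA=3
--
-- MULTISPIKETHRESHOLD=3
--
-- SPIKETHRESHOLD=3
--
-- def checkMultiSpikeUp(ksigmas) -> bool:
--     # spike最多持续3个点, endIdx-startIdx<4
--     count,interval=0,0
--     flag=False
--     for i in range(len(ksigmas)):
--         if (ksigmas[i]>=SIGMA):
--             flag=True
--             interval+=1
--         else:
--             # 结束spike
--             if flag:
--                 if interval<=SPIKETHRESHOLD:
--                     count+=1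
--                 flag=False
--                 interval=0
--             else:
--                 continue
--     if count>=MULTISPIKETHRESHOLD:
--         return True
--     else:
--         return False
-- ===== SOURCE B (Python) =====
-- SIGMA=3
--
-- MULTISPIKETHRESHOLD=3
--
-- SPIKETHRESHOLD=3
--
-- def checkMultiSpikeUp(ksigmas) -> bool:
--     # Run-length encode ksigmas on the predicate (x >= SIGMA): runs of (is_spike, length).
--     runs = []
--     for x in ksigmas:
--         spike = x >= SIGMA
--         if runs and runs[-1][0] == spike:
--             runs[-1][1] += 1
--         else:
--             runs.append([spike, 1])
--     # A trailing spike run never completes (no transition back below SIGMA), so it is not counted.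
--     if runs and runs[-1][0]:
--         runs.pop()
--     count = sum(1 for spike, n in runs if spike and n <= SPIKETHRESHOLD)
--     return count >= MULTISPIKETHRESHOLD
-- ===== Notes on version B (the rewrite author's own statement) =====
-- stated objective: alternative
-- what changed: Replaces A's flag/interval/count state machine with a run-length-encode-then-filter decomposition: build (is_spike, run_length) pairs, drop a trailing in-progress spike run, count short spike runs.
import Mathlib
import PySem

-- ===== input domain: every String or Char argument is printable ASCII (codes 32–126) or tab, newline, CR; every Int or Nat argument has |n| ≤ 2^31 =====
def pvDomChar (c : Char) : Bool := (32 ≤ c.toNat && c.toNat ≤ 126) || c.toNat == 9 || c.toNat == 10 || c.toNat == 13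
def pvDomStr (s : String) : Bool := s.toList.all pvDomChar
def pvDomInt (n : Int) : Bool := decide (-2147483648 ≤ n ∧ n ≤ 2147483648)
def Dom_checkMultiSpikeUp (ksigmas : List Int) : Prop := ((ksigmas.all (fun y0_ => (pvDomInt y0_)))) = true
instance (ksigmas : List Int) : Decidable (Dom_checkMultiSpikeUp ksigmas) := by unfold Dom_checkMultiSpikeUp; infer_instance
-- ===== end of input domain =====

-- B replaces A's flag/interval/count state machine by a run-length-encode-then-filter
-- decomposition (same O(n) cost; objective: alternative structure).


-- ===== PORT A =====
-- the loop body: state (count, interval, flag)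
def pvStepA (s : Int × Int × Bool) (x : Int) : Int × Int × Bool :=
  if x ≥ 3 then (s.1, s.2.1 + 1, true)
  else if s.2.2 then ((if s.2.1 ≤ 3 then s.1 + 1 else s.1), 0, false)
  else s

def checkMultiSpikeUp (ksigmas : List Int) : Bool :=
  -- 'for i in range(len(ksigmas)): … ksigmas[i] …' reads the elements in order
  let s := ksigmas.foldl pvStepA (0, 0, false)
  if s.1 ≥ 3 then true else false

-- ===== PORT B =====
-- run-length encoding step; runs are kept most-recent-first (head = Python's runs[-1]);
-- exact since the final count is order-independent
def pvAddRun (runs : List (Bool × Int)) (x : Int) : List (Bool × Int) :=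
  let spike := decide (x ≥ 3)
  match runs with
  | (s, n) :: rest => if s = spike then (s, n + 1) :: rest else (spike, 1) :: (s, n) :: rest
  | [] => [(spike, 1)]

-- 'if runs and runs[-1][0]: runs.pop()' — drop a trailing (here: head) spike run
def pvDropTrailingSpike (runs : List (Bool × Int)) : List (Bool × Int) :=
  match runs with
  | (true, _) :: rest => rest
  | r => r

def checkMultiSpikeUp_alt (ksigmas : List Int) : Bool :=
  let runs := pvDropTrailingSpike (ksigmas.foldl pvAddRun [])
  decide ((runs.filter (fun r => r.1 && decide (r.2 ≤ 3))).length ≥ 3)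

-- ===== PRECONDITION & SPEC =====
def Spec_checkMultiSpikeUp (ksigmas : List Int) (out : Bool) : Prop := out = checkMultiSpikeUp_alt ksigmas
instance (ksigmas : List Int) (out : Bool) : Decidable (Spec_checkMultiSpikeUp ksigmas out) := by unfold Spec_checkMultiSpikeUp; infer_instance

-- ===== CLAIM (what is proved, stated in full; the proofs are below) =====
def Claim_equal_checkMultiSpikeUp : Prop := ∀ (ksigmas : List Int), Dom_checkMultiSpikeUp ksigmas → Spec_checkMultiSpikeUp ksigmas (checkMultiSpikeUp ksigmas)

-- ===== LEMMAS AND PROOFS =====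
-- completed-spike count of a run list
def pvCC (runs : List (Bool × Int)) : Int :=
  ((pvDropTrailingSpike runs).filter (fun r => r.1 && decide (r.2 ≤ 3))).length

-- A's state as a function of B's run list
def pvAbs (runs : List (Bool × Int)) : Int × Int × Bool :=
  (pvCC runs,
   (match runs with | (true, n) :: _ => n | _ => 0),
   (match runs with | (true, _) :: _ => true | _ => false))

theorem pvStep_abs (r : List (Bool × Int)) (x : Int) :
    pvStepA (pvAbs r) x = pvAbs (pvAddRun r x) := by
  by_cases hx : x ≥ 3 <;>
  · match r with
    | [] => simp [pvStepA, pvAddRun, pvAbs, pvCC, pvDropTrailingSpike, hx]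
    | (s, n) :: rest =>
      by_cases hn : n ≤ 3 <;> cases s <;>
        simp [pvStepA, pvAddRun, pvAbs, pvCC, pvDropTrailingSpike, hx, hn, List.filter]

theorem pvFoldl_abs (l : List Int) (r : List (Bool × Int)) :
    l.foldl pvStepA (pvAbs r) = pvAbs (l.foldl pvAddRun r) := by
  induction l generalizing r with
  | nil => rfl
  | cons x xs ih => simp [List.foldl, pvStep_abs, ih]

-- ===== VERDICT (by name: the statement is the Claim_ definition above) =====
theorem checkMultiSpikeUp_spec : Claim_equal_checkMultiSpikeUp := by
  intro ksigmas _
  unfold Spec_checkMultiSpikeUp checkMultiSpikeUp checkMultiSpikeUp_alt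
  have h0 : pvAbs [] = ((0 : Int), (0 : Int), false) := rfl
  rw [← h0, pvFoldl_abs]
  simp [pvAbs, pvCC]
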